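-- pv_equiv track=rewrite | github.com/suhyeok24/Programmers-For-Coding-Test | Programmers Lv.1/프로그래머스 lv1. 크레인 인형뽑기 게임(카카오인턴십).py | solution
-- ===== SOURCE A (Python) =====
-- def solution(board, moves):
--     # 1. lane설정
--     lane = []
--     for i in zip(*board):
--         lane.append(list(i))
--
--     # 2. 0값 없애기 > 빈라인이면 []이 됨.
--     count = 0
--     for i in range(len(lane)):
--         for j in range(len(lane)):
--             if lane[i][j]:
--                 lane[i][:j] = []
--                 break
--         if lane[i] == [0] * len(lane):  # 모두 0값인 경우 []만들어주기
--             lane[i] = []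
--
--     # 3. 크레인 뽑아서 바구니 넣기
--
--     bas = []  # 바구니 생성
--
--     sum = 0
--     for i, n in enumerate(moves):
--
--         if not lane[n - 1]:  # 빈레인 골랐을때 넘어가기
--             continue
--
--         doll = lane[n - 1].pop(0)  # 크레인이 뽑은 인형
--
--         if bas:  # 바구니가 차있을때
--
--             if bas[-1] != doll:  # 이미 들어있던거랑 같지 않을때 append
--                 bas.append(doll)
--             else:  # 같으면 들어있던거 펑 + append 하지 않음(2개 제거 효과) / 펑 횟수 +1
--                 del bas[-1]
--                 sum += 1
--         else:
--             bas.append(doll)  # 바구니가 비어있을때는 그냥 넣기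
--
--     return sum * 2  # 터진 인형 = 펑 횟수 * 2(한번에 2개 터짐)
-- ===== SOURCE B (Python) =====
-- def solution(board, moves):
--     # Per-lane pointer into the (unmutated) board instead of transpose+strip+pop:
--     # depth[c] is the row of the next doll in column c (past the leading zeros).
--     n = len(board)
--     depth = []
--     for c in range(n):
--         r = 0
--         while r < n and board[r][c] == 0:
--             r += 1
--         depth.append(r)
--     bas = []
--     pairs = 0
--     for m in moves:
--         c = m - 1
--         r = depth[c]
--         if r >= n:
--             continue
--         doll = board[r][c]
--         depth[c] = r + 1
--         if bas and bas[-1] == doll: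
--             bas.pop()
--             pairs += 1
--         else:
--             bas.append(doll)
--     return pairs * 2
-- ===== Notes on version B (the rewrite author's own statement) =====
-- stated objective: faster
-- what changed: B drops A's transpose + zero-stripping + list-mutating pop(0) entirely and instead keeps one integer pointer per column (row of the next doll) over the unmutated board, advancing it per move.
-- outside the precondition, e.g. on solution([[1], [2]], [1]): A returns 0, B raises IndexError; on solution([[0, 5], [7, 0], [9, 9]], [1, 1]): A returns 0, B raises IndexError
import Mathlib
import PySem

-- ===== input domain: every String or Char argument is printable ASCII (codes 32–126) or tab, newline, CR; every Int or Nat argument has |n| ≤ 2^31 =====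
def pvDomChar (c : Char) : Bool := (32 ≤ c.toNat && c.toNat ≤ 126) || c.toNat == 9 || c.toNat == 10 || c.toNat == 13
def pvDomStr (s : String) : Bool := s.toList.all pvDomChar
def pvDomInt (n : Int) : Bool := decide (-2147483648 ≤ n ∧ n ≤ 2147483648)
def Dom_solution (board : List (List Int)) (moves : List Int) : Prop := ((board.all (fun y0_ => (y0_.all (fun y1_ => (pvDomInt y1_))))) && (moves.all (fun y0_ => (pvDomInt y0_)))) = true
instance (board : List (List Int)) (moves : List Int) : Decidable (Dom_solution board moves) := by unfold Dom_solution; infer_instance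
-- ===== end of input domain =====

-- B replaces A's transpose + zero-stripping + pop(0) lane mutation by one integer
-- pointer per column over the unmutated board (neither program mutates its arguments).

-- ===== PORT A =====

-- zip(*board): peel the first element of every row until some row is exhausted
def pyZipStar (b : List (List Int)) : List (List Int) :=
  if h : b.isEmpty = true ∨ b.any (fun r => r.isEmpty) = true then []
  else (b.map (fun r => r.headI)) :: pyZipStar (b.map (fun r => r.tail))
termination_by b.headI.length
decreasing_by
  push_neg at h
  obtain ⟨h1, h2⟩ := h
  cases b with
  | nil => simp at h1
  | cons r rs =>
    simp only [List.any_cons, Bool.or_eq_true] at h2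
    cases r with
    | nil => simp at h2
    | cons x xs => simp

-- 'for j in range(len(lane)): if lane[i][j]: … break' — first j < k with lane[j] ≠ 0.
-- lane[i][j] ported as getD (exact when j < l.length, which Pre_solution guarantees).
def stripFirst (l : List Int) (k j : Nat) : Option Nat :=
  if h : j < k then
    (if l.getD j 0 == 0 then stripFirst l k (j + 1) else some j)
  else none
termination_by k - j

-- body of A's stripping loop for one lane: 'lane[i][:j] = []' then the replicate-check
def stripLane (k : Nat) (l : List Int) : List Int :=
  match stripFirst l k 0 with
  | some j => l.drop j
  | none => if l = List.replicate k 0 then [] else l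

-- body of A's moves loop; state = (lane, bas, sum)
def stepA (st : List (List Int) × List Int × Int) (n : Int) : List (List Int) × List Int × Int :=
  match PySem.List.pyGet? st.1 (n - 1) with
  | none => st  -- Python raises IndexError here (excluded by Pre_solution)
  | some l =>
    match l with
    | [] => st  -- 'if not lane[n-1]: continue'
    | doll :: rest =>
      let lanes' := PySem.List.pySetD st.1 (n - 1) rest  -- lane[n-1].pop(0)
      match st.2.1.getLast? with
      | some top =>
        if top ≠ doll then (lanes', st.2.1 ++ [doll], st.2.2)
        else (lanes', st.2.1.dropLast, st.2.2 + 1)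
      | none => (lanes', st.2.1 ++ [doll], st.2.2)

def solution (board : List (List Int)) (moves : List Int) : Int :=
  let lane0 := pyZipStar board
  let lane := lane0.map (stripLane lane0.length)
  (moves.foldl stepA (lane, [], 0)).2.2 * 2

-- ===== PORT B =====

-- 'r = 0; while r < n and board[r][c] == 0: r += 1' (indices in range under Pre_solution)
def colDepthGo (board : List (List Int)) (n c r : Nat) : Nat :=
  if h : r < n then
    (if (board.getD r []).getD c 0 == 0 then colDepthGo board n c (r + 1) else r)
  else r
termination_by n - r

-- body of B's moves loop; state = (depth, bas, pairs)
def stepB (board : List (List Int)) (n : Nat) (st : List Nat × List Int × Int) (m : Int) : List Nat × List Int × Int :=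
  match PySem.List.pyGet? st.1 (m - 1) with
  | none => st  -- Python raises IndexError here (excluded by Pre_solution)
  | some r =>
    if n ≤ r then st  -- 'if r >= n: continue'
    else
      let doll := PySem.List.pyGetD (board.getD r []) (m - 1) 0  -- board[r][c]
      let depth' := PySem.List.pySetD st.1 (m - 1) (r + 1)       -- depth[c] = r + 1
      match st.2.1.getLast? with
      | some top =>
        if top == doll then (depth', st.2.1.dropLast, st.2.2 + 1)
        else (depth', st.2.1 ++ [doll], st.2.2)
      | none => (depth', st.2.1 ++ [doll], st.2.2)

def solution_alt (board : List (List Int)) (moves : List Int) : Int :=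
  let n := board.length
  let depth := (List.range n).map (fun c => colDepthGo board n c 0)
  (moves.foldl (stepB board n) (depth, [], 0)).2.2 * 2

-- ===== PRECONDITION & SPEC =====

-- Pre_ restricts to the problem's stated domain: a square board and moves that are
-- in-range (possibly Python-negative) column indices.  Outside it A raises IndexError
-- or, on ragged boards, returns values shaped by its truncating zip and partial
-- zero-stripping; B (naturally indexing the board by len(board)) raises there.
def Pre_solution (board : List (List Int)) (moves : List Int) : Prop :=
  (∀ row ∈ board, row.length = board.length) ∧
  (∀ m ∈ moves, 1 - (board.length : Int) ≤ m ∧ m ≤ (board.length : Int))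
instance (board : List (List Int)) (moves : List Int) : Decidable (Pre_solution board moves) := by unfold Pre_solution; infer_instance

def pvWitness_solution : List (List Int) × List Int := ([[0, 3], [2, 3]], [1, 2, 0, 2])

def Spec_solution (board : List (List Int)) (moves : List Int) (out : Int) : Prop := out = solution_alt board moves
instance (board : List (List Int)) (moves : List Int) (out : Int) : Decidable (Spec_solution board moves out) := by unfold Spec_solution; infer_instance

-- ===== CLAIM (what is proved, stated in full; the proofs are below) =====
def Claim_equal_solution : Prop := ∀ (board : List (List Int)) (moves : List Int), Dom_solution board moves → Pre_solution board moves → Spec_solution board moves (solution board moves)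

-- ===== LEMMAS AND PROOFS =====

-- number of leading zeros of a lane
def fnz (l : List Int) : Nat := (l.takeWhile (fun x => x == 0)).length

-- column c of the board, as A's zip builds it
def colF (board : List (List Int)) (c : Nat) : List Int := board.map (fun row => row.getD c 0)

theorem fnz_le (l : List Int) : fnz l ≤ l.length := by
  unfold fnz; exact (List.takeWhile_prefix _).length_le

theorem fnz_eq_length (l : List Int) (h : fnz l = l.length) : l = List.replicate l.length 0 := by
  apply List.eq_replicate_iff.mpr
  refine ⟨rfl, ?_⟩
  intro b hb
  have heq : l.takeWhile (fun x : Int => x == 0) = l :=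
    (List.takeWhile_prefix _).eq_of_length (by unfold fnz at h; exact h)
  have hbm : b ∈ l.takeWhile (fun x : Int => x == 0) := by rw [heq]; exact hb
  simpa using List.mem_takeWhile_imp hbm

theorem cell_eq (board : List (List Int)) (c : Nat) : ∀ r : Nat,
    (board.getD r ([] : List Int)).getD c 0 = (colF board c).getD r 0 := by
  induction board with
  | nil => intro r; simp [colF]
  | cons row rows ih =>
    intro r
    cases r with
    | zero => simp [colF]
    | succ r => simpa [colF] using ih r

theorem colF_length (board : List (List Int)) (c : Nat) : (colF board c).length = board.length := by
  simp [colF]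

theorem fnz_drop (l : List Int) (j : Nat) (hj : j < l.length) :
    fnz (l.drop j) = (if l[j] == 0 then fnz (l.drop (j + 1)) + 1 else 0) := by
  rw [List.drop_eq_getElem_cons hj]
  unfold fnz
  by_cases h : l[j] = 0 <;> simp [List.takeWhile_cons, h]

theorem colDepthGo_eq (board : List (List Int)) (n c : Nat) (hn : board.length = n) :
    ∀ d j, j ≤ n → n - j = d → colDepthGo board n c j = j + fnz ((colF board c).drop j) := by
  intro d
  induction d with
  | zero =>
    intro j hj hd
    rw [colDepthGo, dif_neg (by omega : ¬ j < n)]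
    have hdrop : (colF board c).drop j = [] := List.drop_eq_nil_of_le (by rw [colF_length, hn]; omega)
    rw [hdrop]
    simp [fnz]
  | succ d ih =>
    intro j hj hd
    have hjn : j < n := by omega
    have hjl : j < (colF board c).length := by rw [colF_length, hn]; exact hjn
    rw [colDepthGo, dif_pos hjn, cell_eq, List.getD_eq_getElem _ _ hjl, fnz_drop _ _ hjl]
    by_cases hz : (colF board c)[j] = 0
    · simp only [hz, BEq.rfl, if_true]
      rw [ih (j + 1) (by omega) (by omega)]
      omega
    · simp [hz]

theorem stripFirst_eq (l : List Int) (k : Nat) (hl : l.length = k) :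
    ∀ d j, j ≤ k → k - j = d →
      stripFirst l k j = if j + fnz (l.drop j) < k then some (j + fnz (l.drop j)) else none := by
  intro d
  induction d with
  | zero =>
    intro j hj hd
    rw [stripFirst, dif_neg (by omega : ¬ j < k)]
    have hdrop : l.drop j = [] := List.drop_eq_nil_of_le (by omega)
    rw [hdrop]
    have hf : fnz ([] : List Int) = 0 := rfl
    rw [hf, if_neg (by omega)]
  | succ d ih =>
    intro j hj hd
    have hjk : j < k := by omega
    have hjl : j < l.length := by omega
    rw [stripFirst, dif_pos hjk, List.getD_eq_getElem _ _ hjl, fnz_drop _ _ hjl]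
    by_cases hz : l[j] = 0
    · simp only [hz, BEq.rfl, if_true]
      rw [ih (j + 1) (by omega) (by omega)]
      have : j + (fnz (l.drop (j + 1)) + 1) = j + 1 + fnz (l.drop (j + 1)) := by omega
      rw [this]
    · simp [hz, hjk]

theorem stripLane_eq (l : List Int) (k : Nat) (hl : l.length = k) :
    stripLane k l = l.drop (fnz l) := by
  unfold stripLane
  rw [stripFirst_eq l k hl (k - 0) 0 (by omega) rfl]
  simp only [Nat.zero_add, List.drop_zero]
  by_cases hlt : fnz l < k
  · simp [hlt]
  · have hfk : fnz l = k := by have := fnz_le l; omega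
    have hrep : l = List.replicate l.length 0 := fnz_eq_length l (by omega)
    rw [if_neg hlt, if_pos (by rw [← hl]; exact hrep)]
    rw [hfk, ← hl, List.drop_length]

theorem zipStar_eq : ∀ (k : Nat) (b : List (List Int)), b ≠ [] → (∀ r ∈ b, r.length = k) →
    pyZipStar b = (List.range k).map (fun c => b.map (fun row => row.getD c 0)) := by
  intro k
  induction k with
  | zero =>
    intro b hb hr
    have : b.any (fun r => r.isEmpty) = true := by
      cases b with
      | nil => exact absurd rfl hb
      | cons r rs =>
        simp only [List.any_cons, Bool.or_eq_true]
        left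
        rw [List.isEmpty_iff, ← List.length_eq_zero_iff]
        exact hr r (by simp)
    rw [pyZipStar, dif_pos (Or.inr this)]
    rfl
  | succ k ih =>
    intro b hb hr
    have hne : ∀ r ∈ b, r ≠ [] := by
      intro r hrm hcon
      have := hr r hrm
      rw [hcon] at this
      simp at this
    rw [pyZipStar]
    have hcond : ¬ (b.isEmpty = true ∨ b.any (fun r => r.isEmpty) = true) := by
      rintro (h1 | h2)
      · rw [List.isEmpty_iff] at h1
        exact hb h1
      · obtain ⟨r, hrm, hre⟩ := List.any_eq_true.mp h2
        rw [List.isEmpty_iff] at hre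
        exact hne r hrm hre
    rw [dif_neg hcond]
    rw [ih (b.map (fun r => r.tail))
        (by simpa using hb)
        (by intro r hrm
            obtain ⟨r0, hr0, rfl⟩ := List.mem_map.mp hrm
            have := hr r0 hr0
            simp [List.length_tail, this])]
    rw [List.range_succ_eq_map]
    simp only [List.map_cons, List.map_map]
    congr 1
    · apply List.map_congr_left
      intro r hrm
      cases r with
      | nil => exact absurd rfl (hne _ hrm)
      | cons x xs => rfl
    · apply List.map_congr_left
      intro c _
      simp only [Function.comp]
      apply List.map_congr_left
      intro r hrm
      cases r with
      | nil => exact absurd rfl (hne _ hrm)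
      | cons x xs => rfl

-- A's lane list as a function of B's depth list
def laneOf (board : List (List Int)) (n : Nat) (d : List Nat) : List (List Int) :=
  (List.range n).map (fun c => (colF board c).drop (d.getD c 0))

theorem laneOf_length (board : List (List Int)) (n : Nat) (d : List Nat) :
    (laneOf board n d).length = n := by simp [laneOf]

theorem laneOf_set (board : List (List Int)) (n : Nat) (d : List Nat) (j v : Nat)
    (hd : d.length = n) (hj : j < n) :
    (laneOf board n d).set j ((colF board j).drop v) = laneOf board n (d.set j v) := by
  apply List.ext_getElem
  · simp [laneOf]
  · intro i h1 h2
    simp only [laneOf, List.getElem_set, List.getElem_map, List.getElem_range] at h1 h2 ⊢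
    have hi : i < n := by simpa [laneOf] using h2
    by_cases hij : j = i
    · subst hij
      rw [if_pos rfl, List.getD_eq_getElem _ _ (by simp only [List.length_set, hd]; exact hi),
        List.getElem_set_self]
    · rw [if_neg hij]
      have hgd : (d.set j v).getD i 0 = d.getD i 0 := by
        by_cases hi' : i < d.length
        · rw [List.getD_eq_getElem _ _ (by simpa using hi'), List.getD_eq_getElem _ _ hi',
            List.getElem_set_ne (by omega)]
        · rw [List.getD_eq_default _ _ (by simpa using hi'), List.getD_eq_default _ _ (by omega)]
      rw [hgd]

-- normalization of a Python index i ∈ [-len, len) used by both ports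
theorem pyGet?_norm_nonneg {α : Type} (xs : List α) (i : Int) (h0 : 0 ≤ i) (h : i < xs.length) :
    PySem.List.pyGet? xs i = some (xs[i.toNat]'(by omega)) := by
  rw [PySem.List.pyGet?_of_nonneg _ h0, List.getElem?_eq_getElem (by omega)]

theorem pyGet?_norm_neg {α : Type} (xs : List α) (i : Int) (h0 : i < 0) (h : -(xs.length : Int) ≤ i) :
    PySem.List.pyGet? xs i = some (xs[(i + xs.length).toNat]'(by omega)) := by
  obtain ⟨k, rfl⟩ : ∃ k : Nat, i = -(k : Int) := ⟨(-i).toNat, by omega⟩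
  rw [PySem.List.pyGet?_neg_natCast _ _ (by omega) (by omega),
    List.getElem?_eq_getElem (by omega)]
  have e : (-(k : Int) + xs.length).toNat = xs.length - k := by omega
  simp only [e]

theorem pySetD_norm_neg {α : Type} (xs : List α) (v : α) (i : Int) (h0 : i < 0)
    (h : -(xs.length : Int) ≤ i) :
    PySem.List.pySetD xs i v = xs.set (i + xs.length).toNat v := by
  obtain ⟨k, rfl⟩ : ∃ k : Nat, i = -(k : Int) := ⟨(-i).toNat, by omega⟩
  rw [show ((-(k : Int)) + xs.length).toNat = xs.length - k by omega]
  have hkk : k ≠ 0 := by omega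
  simp [PySem.List.pySetD, PySem.List.pySet?, PySem.List.pyIdx?, hkk,
    (by omega : k ≤ xs.length)]

theorem pyGetD_norm {α : Type} [Inhabited α] (xs : List α) (dflt : α) (i : Int) (j : Nat)
    (hj : j < xs.length) (hij : (j : Int) = if i < 0 then i + xs.length else i) :
    PySem.List.pyGetD xs i dflt = xs.getD j dflt := by
  rw [List.getD_eq_getElem _ _ hj]
  by_cases h0 : i < 0
  · rw [if_pos h0] at hij
    have := pyGet?_norm_neg xs i h0 (by omega)
    simp only [PySem.List.pyGetD, this, Option.getD_some]
    congr 1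
    omega
  · rw [if_neg h0] at hij
    have := pyGet?_norm_nonneg xs i (by omega) (by omega)
    simp only [PySem.List.pyGetD, this, Option.getD_some]
    congr 1
    omega

theorem step_eq (board : List (List Int)) (n : Nat) (hn : board.length = n)
    (hsq : ∀ row ∈ board, row.length = n) (d : List Nat) (bas : List Int) (s : Int) (m : Int)
    (hd : d.length = n) (hm1 : 1 - (n : Int) ≤ m) (hm2 : m ≤ (n : Int)) :
    stepA (laneOf board n d, bas, s) m =
      (laneOf board n (stepB board n (d, bas, s) m).1,
        (stepB board n (d, bas, s) m).2.1, (stepB board n (d, bas, s) m).2.2) := by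
  -- the normalized (wrapped) index j of m - 1
  have hnpos : 0 < n := by omega
  obtain ⟨j, hjn, hj⟩ : ∃ j : Nat, j < n ∧ (j : Int) = (if m - 1 < 0 then m - 1 + n else m - 1) := by
    by_cases h0 : m - 1 < 0
    · exact ⟨(m - 1 + n).toNat, by omega, by rw [if_pos h0]; omega⟩
    · exact ⟨(m - 1).toNat, by omega, by rw [if_neg h0]; omega⟩
  have hgetL : PySem.List.pyGet? (laneOf board n d) (m - 1) =
      some ((colF board j).drop (d.getD j 0)) := by
    by_cases h0 : m - 1 < 0
    · rw [pyGet?_norm_neg _ _ h0 (by rw [laneOf_length]; omega)]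
      rw [if_pos h0] at hj
      congr 1
      simp only [laneOf, List.length_map, List.length_range, List.getElem_map,
        List.getElem_range]
      have e : (m - 1 + (n : Int)).toNat = j := by omega
      rw [e]
    · rw [pyGet?_norm_nonneg _ _ (by omega) (by rw [laneOf_length]; omega)]
      rw [if_neg h0] at hj
      congr 1
      simp only [laneOf, List.length_map, List.length_range, List.getElem_map,
        List.getElem_range]
      have e : (m - 1).toNat = j := by omega
      rw [e]
  have hgetD : PySem.List.pyGet? d (m - 1) = some (d.getD j 0) := by
    by_cases h0 : m - 1 < 0
    · rw [pyGet?_norm_neg _ _ h0 (by omega)]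
      rw [if_pos h0] at hj
      rw [List.getD_eq_getElem _ _ (by omega)]
      have e : (m - 1 + (d.length : Int)).toNat = j := by omega
      simp only [e]
    · rw [pyGet?_norm_nonneg _ _ (by omega) (by omega)]
      rw [if_neg h0] at hj
      rw [List.getD_eq_getElem _ _ (by omega)]
      have e : (m - 1).toNat = j := by omega
      simp only [e]
  set r := d.getD j 0 with hr
  unfold stepA stepB
  rw [hgetL, hgetD]
  simp only
  by_cases hrn : n ≤ r
  · -- empty lane / exhausted column
    have hnil : (colF board j).drop r = [] := List.drop_eq_nil_of_le (by rw [colF_length, hn]; omega)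
    rw [hnil, if_pos hrn]
  · rw [if_neg hrn]
    have hrl : r < (colF board j).length := by rw [colF_length, hn]; omega
    rw [List.drop_eq_getElem_cons hrl]
    -- the two dolls agree
    have hrow : board.getD r [] = board[r]'(by omega) := List.getD_eq_getElem _ _ (by omega)
    have hrowlen : (board[r]'(by omega) : List Int).length = n := hsq _ (List.getElem_mem _)
    have hdoll : PySem.List.pyGetD (board.getD r []) (m - 1) 0 = (colF board j)[r]'hrl := by
      rw [hrow, pyGetD_norm _ _ (m - 1) j (by rw [hrowlen]; omega) (by rw [hrowlen]; exact hj)]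
      rw [show (board[r]'(by omega) : List Int).getD j 0 = (board.getD r []).getD j 0 by
        rw [hrow]]
      rw [cell_eq board j r]
      exact List.getD_eq_getElem _ _ hrl
    -- the two updated lane/depth states agree
    have hset : PySem.List.pySetD (laneOf board n d) (m - 1) ((colF board j).drop (r + 1)) =
        laneOf board n (PySem.List.pySetD d (m - 1) (r + 1)) := by
      by_cases h0 : m - 1 < 0
      · rw [pySetD_norm_neg _ _ _ h0 (by rw [laneOf_length]; omega),
          pySetD_norm_neg _ _ _ h0 (by omega)]
        rw [if_pos h0] at hj
        have e1 : ((m - 1) + ((laneOf board n d).length : Int)).toNat = j := by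
          rw [laneOf_length]; omega
        have e2 : ((m - 1) + (d.length : Int)).toNat = j := by omega
        rw [e1, e2, laneOf_set board n d j (r + 1) hd hjn]
      · rw [PySem.List.pySetD_of_nonneg _ _ (by omega),
          PySem.List.pySetD_of_nonneg _ _ (by omega)]
        rw [if_neg h0] at hj
        have e1 : (m - 1).toNat = j := by omega
        rw [e1, laneOf_set board n d j (r + 1) hd hjn]
    simp only [hdoll, hset]
    cases hb : bas.getLast? with
    | none => simp
    | some top =>
      by_cases ht : top = (colF board j)[r]'hrl
      · simp [ht]
      · simp [ht]

theorem fold_eq (board : List (List Int)) (n : Nat) (hn : board.length = n)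
    (hsq : ∀ row ∈ board, row.length = n) :
    ∀ (moves : List Int) (d : List Nat) (bas : List Int) (s : Int), d.length = n →
      (∀ m ∈ moves, 1 - (n : Int) ≤ m ∧ m ≤ (n : Int)) →
      moves.foldl stepA (laneOf board n d, bas, s) =
        (laneOf board n (moves.foldl (stepB board n) (d, bas, s)).1,
          (moves.foldl (stepB board n) (d, bas, s)).2.1,
          (moves.foldl (stepB board n) (d, bas, s)).2.2) := by
  intro moves
  induction moves with
  | nil => intro d bas s hd _; rfl
  | cons m ms ih =>
    intro d bas s hd hms
    obtain ⟨hm1, hm2⟩ := hms m (by simp)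
    simp only [List.foldl_cons]
    rw [step_eq board n hn hsq d bas s m hd hm1 hm2]
    have hd' : (stepB board n (d, bas, s) m).1.length = n := by
      unfold stepB
      cases hg : PySem.List.pyGet? d (m - 1) with
      | none => exact hd
      | some r =>
        simp only
        by_cases hrn : n ≤ r
        · rw [if_pos hrn]; exact hd
        · rw [if_neg hrn]
          cases bas.getLast? with
          | none => exact (PySem.List.length_pySetD _ _ _).trans hd
          | some top =>
            simp only
            by_cases ht : (top == PySem.List.pyGetD (board.getD r []) (m - 1) 0) = true
            · rw [if_pos ht]
              exact (PySem.List.length_pySetD _ _ _).trans hd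
            · rw [if_neg ht]
              exact (PySem.List.length_pySetD _ _ _).trans hd
    rw [ih _ _ _ hd' (fun x hx => hms x (by simp [hx]))]

theorem depth_init (board : List (List Int)) (n : Nat) (hn : board.length = n) (c : Nat) :
    colDepthGo board n c 0 = fnz (colF board c) := by
  rw [colDepthGo_eq board n c hn (n - 0) 0 (by omega) rfl]
  simp

theorem lane_init (board : List (List Int)) (n : Nat) (hn : board.length = n) (hne : board ≠ [])
    (hsq : ∀ row ∈ board, row.length = n) :
    (pyZipStar board).map (stripLane (pyZipStar board).length) =
      laneOf board n ((List.range n).map (fun c => colDepthGo board n c 0)) := by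
  rw [zipStar_eq n board hne hsq]
  have hlen : ((List.range n).map (fun c => board.map (fun row => row.getD c 0))).length = n := by
    simp
  rw [hlen]
  unfold laneOf
  rw [List.map_map]
  apply List.map_congr_left
  intro c hc
  have hcn : c < n := List.mem_range.mp hc
  simp only [Function.comp]
  have hcol : board.map (fun row => row.getD c 0) = colF board c := rfl
  rw [hcol, stripLane_eq (colF board c) n (by rw [colF_length, hn]),
    List.getD_eq_getElem _ _ (by simpa using hcn), List.getElem_map, List.getElem_range,
    depth_init board n hn c]

-- ===== VERDICT (by name: the statement is the Claim_ definition above) =====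
theorem solution_spec : Claim_equal_solution := by
  intro board moves _ hpre
  obtain ⟨hsq, hmv⟩ := hpre
  unfold Spec_solution
  cases hb : board with
  | nil =>
    -- n = 0, so Pre_solution forces moves = []
    subst hb
    have hmz : moves = [] := by
      cases moves with
      | nil => rfl
      | cons m ms =>
        obtain ⟨h1, h2⟩ := hmv m (by simp)
        simp at h1 h2
        omega
    subst hmz
    rfl
  | cons row rows =>
    rw [← hb]
    have hne : board ≠ [] := by rw [hb]; simp
    simp only [solution, solution_alt]
    rw [lane_init board board.length rfl hne hsq]
    rw [fold_eq board board.length rfl hsq moves _ [] 0 (by simp) hmv]
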